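-- pv_equiv track=rewrite | github.com/cued-ia-computing/flood-jw2190-lk476 | floodsystem/plot.py | percent_to_hexcol
-- ===== SOURCE A (Python) =====
-- def percent_to_hexcol(oned_perc_change):
--     """converts a percentage to a hexidecimal colour from green to red"""
--     hexes = []
--     for perc in oned_perc_change:
--         if perc < -40: hexes.append("#118f24")
--         elif perc < -20: hexes.append("#14f514")
--         elif perc < -10: hexes.append("#b9f514")
--         elif perc < 0: hexes.append("#edf514")
--         elif perc < 10: hexes.append("#f5c114")
--         elif perc < 20: hexes.append("#f57914")
--         elif perc < 40: hexes.append("#f53614")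
--         elif perc < 60: hexes.append("#a61111")
--         elif perc < 80: hexes.append("#540606")
--     return hexes
-- ===== SOURCE B (Python) =====
-- _THRESHOLDS = [-40, -20, -10, 0, 10, 20, 40, 60, 80]
-- _COLORS = ["#118f24", "#14f514", "#b9f514", "#edf514", "#f5c114",
--            "#f57914", "#f53614", "#a61111", "#540606"]
--
--
-- def percent_to_hexcol(oned_perc_change):
--     """converts a percentage to a hexidecimal colour from green to red"""
--     hexes = []
--     for perc in oned_perc_change:
--         i = sum(1 for t in _THRESHOLDS if t <= perc)
--         if i < len(_COLORS):
--             hexes.append(_COLORS[i])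
--     return hexes
-- ===== Notes on version B (the rewrite author's own statement) =====
-- stated objective: idiomatic
-- what changed: Replaced the 8-branch comparison cascade with a sorted threshold table and a parallel colour table: per element compute the table rank (number of thresholds <= perc) and index into the colour list, skipping when the rank falls past the table (perc >= 80).
import Mathlib
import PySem

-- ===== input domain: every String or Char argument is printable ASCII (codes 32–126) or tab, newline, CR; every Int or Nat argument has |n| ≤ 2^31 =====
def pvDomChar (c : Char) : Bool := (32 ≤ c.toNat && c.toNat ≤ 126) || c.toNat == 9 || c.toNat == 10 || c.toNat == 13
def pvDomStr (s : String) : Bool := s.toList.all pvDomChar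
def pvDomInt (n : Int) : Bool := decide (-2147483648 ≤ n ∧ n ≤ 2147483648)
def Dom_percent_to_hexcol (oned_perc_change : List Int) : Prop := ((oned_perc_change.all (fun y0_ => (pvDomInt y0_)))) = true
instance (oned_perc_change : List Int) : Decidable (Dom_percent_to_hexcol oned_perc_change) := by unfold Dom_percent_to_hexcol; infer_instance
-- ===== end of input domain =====

-- ===== PORT A =====
-- B replaces A's if/elif cascade by a threshold-table rank lookup (idiomatic, same cost).
def percent_to_hexcol (oned_perc_change : List Int) : List String :=
  oned_perc_change.foldl (fun hexes perc =>
    if perc < -40 then hexes ++ ["#118f24"]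
    else if perc < -20 then hexes ++ ["#14f514"]
    else if perc < -10 then hexes ++ ["#b9f514"]
    else if perc < 0 then hexes ++ ["#edf514"]
    else if perc < 10 then hexes ++ ["#f5c114"]
    else if perc < 20 then hexes ++ ["#f57914"]
    else if perc < 40 then hexes ++ ["#f53614"]
    else if perc < 60 then hexes ++ ["#a61111"]
    else if perc < 80 then hexes ++ ["#540606"]
    else hexes) []

-- ===== PORT B =====
def pvThresholds : List Int := [-40, -20, -10, 0, 10, 20, 40, 60, 80]
def pvColors : List String := ["#118f24", "#14f514", "#b9f514", "#edf514", "#f5c114",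
                               "#f57914", "#f53614", "#a61111", "#540606"]

def percent_to_hexcol_alt (oned_perc_change : List Int) : List String :=
  oned_perc_change.foldl (fun hexes perc =>
    let i : Nat := pvThresholds.foldl (fun s t => if t ≤ perc then s + 1 else s) 0
    if i < pvColors.length then hexes ++ [pvColors.getD i ""] else hexes) []

-- ===== PRECONDITION & SPEC =====
def Spec_percent_to_hexcol (oned_perc_change : List Int) (out : List String) : Prop := out = percent_to_hexcol_alt oned_perc_change
instance (oned_perc_change : List Int) (out : List String) : Decidable (Spec_percent_to_hexcol oned_perc_change out) := by unfold Spec_percent_to_hexcol; infer_instance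

-- ===== CLAIM (what is proved, stated in full; the proofs are below) =====
def Claim_equal_percent_to_hexcol : Prop := ∀ (oned_perc_change : List Int), Dom_percent_to_hexcol oned_perc_change → Spec_percent_to_hexcol oned_perc_change (percent_to_hexcol oned_perc_change)

-- ===== LEMMAS AND PROOFS =====

-- ===== VERDICT (by name: the statement is the Claim_ definition above) =====
lemma pv_count_eq (perc : Int) : ∀ (l : List Int) (s : Nat),
    l.foldl (fun s t => if t ≤ perc then s + 1 else s) s
      = s + l.countP (fun t => decide (t ≤ perc)) := by
  intro l
  induction l with
  | nil => simp
  | cons a l ih =>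
    intro s
    simp only [List.foldl_cons, List.countP_cons, ih, decide_eq_true_eq]
    split_ifs <;> omega

lemma pv_rank_eq (perc : Int) :
    pvThresholds.foldl (fun s t => if t ≤ perc then s + 1 else s) 0 =
      if perc < -40 then 0 else if perc < -20 then 1 else if perc < -10 then 2
      else if perc < 0 then 3 else if perc < 10 then 4 else if perc < 20 then 5
      else if perc < 40 then 6 else if perc < 60 then 7 else if perc < 80 then 8 else 9 := by
  rw [pv_count_eq]
  simp only [pvThresholds, List.countP_cons, List.countP_nil, decide_eq_true_eq]
  by_cases h0 : perc < (-40:Int)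
  · simp only [if_neg (show ¬((-40:Int) ≤ perc) by omega), if_neg (show ¬((-20:Int) ≤ perc) by omega), if_neg (show ¬((-10:Int) ≤ perc) by omega), if_neg (show ¬((0:Int) ≤ perc) by omega), if_neg (show ¬((10:Int) ≤ perc) by omega), if_neg (show ¬((20:Int) ≤ perc) by omega), if_neg (show ¬((40:Int) ≤ perc) by omega), if_neg (show ¬((60:Int) ≤ perc) by omega), if_neg (show ¬((80:Int) ≤ perc) by omega), if_pos (show (perc < (-40:Int)) by omega)]
  by_cases h1 : perc < (-20:Int)
  · simp only [if_pos (show ((-40:Int) ≤ perc) by omega), if_neg (show ¬((-20:Int) ≤ perc) by omega), if_neg (show ¬((-10:Int) ≤ perc) by omega), if_neg (show ¬((0:Int) ≤ perc) by omega), if_neg (show ¬((10:Int) ≤ perc) by omega), if_neg (show ¬((20:Int) ≤ perc) by omega), if_neg (show ¬((40:Int) ≤ perc) by omega), if_neg (show ¬((60:Int) ≤ perc) by omega), if_neg (show ¬((80:Int) ≤ perc) by omega), if_neg (show ¬(perc < (-40:Int)) by omega), if_pos (show (perc < (-20:Int)) by omega)]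
  by_cases h2 : perc < (-10:Int)
  · simp only [if_pos (show ((-40:Int) ≤ perc) by omega), if_pos (show ((-20:Int) ≤ perc) by omega), if_neg (show ¬((-10:Int) ≤ perc) by omega), if_neg (show ¬((0:Int) ≤ perc) by omega), if_neg (show ¬((10:Int) ≤ perc) by omega), if_neg (show ¬((20:Int) ≤ perc) by omega), if_neg (show ¬((40:Int) ≤ perc) by omega), if_neg (show ¬((60:Int) ≤ perc) by omega), if_neg (show ¬((80:Int) ≤ perc) by omega), if_neg (show ¬(perc < (-40:Int)) by omega), if_neg (show ¬(perc < (-20:Int)) by omega), if_pos (show (perc < (-10:Int)) by omega)]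
  by_cases h3 : perc < (0:Int)
  · simp only [if_pos (show ((-40:Int) ≤ perc) by omega), if_pos (show ((-20:Int) ≤ perc) by omega), if_pos (show ((-10:Int) ≤ perc) by omega), if_neg (show ¬((0:Int) ≤ perc) by omega), if_neg (show ¬((10:Int) ≤ perc) by omega), if_neg (show ¬((20:Int) ≤ perc) by omega), if_neg (show ¬((40:Int) ≤ perc) by omega), if_neg (show ¬((60:Int) ≤ perc) by omega), if_neg (show ¬((80:Int) ≤ perc) by omega), if_neg (show ¬(perc < (-40:Int)) by omega), if_neg (show ¬(perc < (-20:Int)) by omega), if_neg (show ¬(perc < (-10:Int)) by omega), if_pos (show (perc < (0:Int)) by omega)]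
  by_cases h4 : perc < (10:Int)
  · simp only [if_pos (show ((-40:Int) ≤ perc) by omega), if_pos (show ((-20:Int) ≤ perc) by omega), if_pos (show ((-10:Int) ≤ perc) by omega), if_pos (show ((0:Int) ≤ perc) by omega), if_neg (show ¬((10:Int) ≤ perc) by omega), if_neg (show ¬((20:Int) ≤ perc) by omega), if_neg (show ¬((40:Int) ≤ perc) by omega), if_neg (show ¬((60:Int) ≤ perc) by omega), if_neg (show ¬((80:Int) ≤ perc) by omega), if_neg (show ¬(perc < (-40:Int)) by omega), if_neg (show ¬(perc < (-20:Int)) by omega), if_neg (show ¬(perc < (-10:Int)) by omega), if_neg (show ¬(perc < (0:Int)) by omega), if_pos (show (perc < (10:Int)) by omega)]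
  by_cases h5 : perc < (20:Int)
  · simp only [if_pos (show ((-40:Int) ≤ perc) by omega), if_pos (show ((-20:Int) ≤ perc) by omega), if_pos (show ((-10:Int) ≤ perc) by omega), if_pos (show ((0:Int) ≤ perc) by omega), if_pos (show ((10:Int) ≤ perc) by omega), if_neg (show ¬((20:Int) ≤ perc) by omega), if_neg (show ¬((40:Int) ≤ perc) by omega), if_neg (show ¬((60:Int) ≤ perc) by omega), if_neg (show ¬((80:Int) ≤ perc) by omega), if_neg (show ¬(perc < (-40:Int)) by omega), if_neg (show ¬(perc < (-20:Int)) by omega), if_neg (show ¬(perc < (-10:Int)) by omega), if_neg (show ¬(perc < (0:Int)) by omega), if_neg (show ¬(perc < (10:Int)) by omega), if_pos (show (perc < (20:Int)) by omega)]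
  by_cases h6 : perc < (40:Int)
  · simp only [if_pos (show ((-40:Int) ≤ perc) by omega), if_pos (show ((-20:Int) ≤ perc) by omega), if_pos (show ((-10:Int) ≤ perc) by omega), if_pos (show ((0:Int) ≤ perc) by omega), if_pos (show ((10:Int) ≤ perc) by omega), if_pos (show ((20:Int) ≤ perc) by omega), if_neg (show ¬((40:Int) ≤ perc) by omega), if_neg (show ¬((60:Int) ≤ perc) by omega), if_neg (show ¬((80:Int) ≤ perc) by omega), if_neg (show ¬(perc < (-40:Int)) by omega), if_neg (show ¬(perc < (-20:Int)) by omega), if_neg (show ¬(perc < (-10:Int)) by omega), if_neg (show ¬(perc < (0:Int)) by omega), if_neg (show ¬(perc < (10:Int)) by omega), if_neg (show ¬(perc < (20:Int)) by omega), if_pos (show (perc < (40:Int)) by omega)]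
  by_cases h7 : perc < (60:Int)
  · simp only [if_pos (show ((-40:Int) ≤ perc) by omega), if_pos (show ((-20:Int) ≤ perc) by omega), if_pos (show ((-10:Int) ≤ perc) by omega), if_pos (show ((0:Int) ≤ perc) by omega), if_pos (show ((10:Int) ≤ perc) by omega), if_pos (show ((20:Int) ≤ perc) by omega), if_pos (show ((40:Int) ≤ perc) by omega), if_neg (show ¬((60:Int) ≤ perc) by omega), if_neg (show ¬((80:Int) ≤ perc) by omega), if_neg (show ¬(perc < (-40:Int)) by omega), if_neg (show ¬(perc < (-20:Int)) by omega), if_neg (show ¬(perc < (-10:Int)) by omega), if_neg (show ¬(perc < (0:Int)) by omega), if_neg (show ¬(perc < (10:Int)) by omega), if_neg (show ¬(perc < (20:Int)) by omega), if_neg (show ¬(perc < (40:Int)) by omega), if_pos (show (perc < (60:Int)) by omega)]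
  by_cases h8 : perc < (80:Int)
  · simp only [if_pos (show ((-40:Int) ≤ perc) by omega), if_pos (show ((-20:Int) ≤ perc) by omega), if_pos (show ((-10:Int) ≤ perc) by omega), if_pos (show ((0:Int) ≤ perc) by omega), if_pos (show ((10:Int) ≤ perc) by omega), if_pos (show ((20:Int) ≤ perc) by omega), if_pos (show ((40:Int) ≤ perc) by omega), if_pos (show ((60:Int) ≤ perc) by omega), if_neg (show ¬((80:Int) ≤ perc) by omega), if_neg (show ¬(perc < (-40:Int)) by omega), if_neg (show ¬(perc < (-20:Int)) by omega), if_neg (show ¬(perc < (-10:Int)) by omega), if_neg (show ¬(perc < (0:Int)) by omega), if_neg (show ¬(perc < (10:Int)) by omega), if_neg (show ¬(perc < (20:Int)) by omega), if_neg (show ¬(perc < (40:Int)) by omega), if_neg (show ¬(perc < (60:Int)) by omega), if_pos (show (perc < (80:Int)) by omega)]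
  simp only [if_pos (show ((-40:Int) ≤ perc) by omega), if_pos (show ((-20:Int) ≤ perc) by omega), if_pos (show ((-10:Int) ≤ perc) by omega), if_pos (show ((0:Int) ≤ perc) by omega), if_pos (show ((10:Int) ≤ perc) by omega), if_pos (show ((20:Int) ≤ perc) by omega), if_pos (show ((40:Int) ≤ perc) by omega), if_pos (show ((60:Int) ≤ perc) by omega), if_pos (show ((80:Int) ≤ perc) by omega), if_neg (show ¬(perc < (-40:Int)) by omega), if_neg (show ¬(perc < (-20:Int)) by omega), if_neg (show ¬(perc < (-10:Int)) by omega), if_neg (show ¬(perc < (0:Int)) by omega), if_neg (show ¬(perc < (10:Int)) by omega), if_neg (show ¬(perc < (20:Int)) by omega), if_neg (show ¬(perc < (40:Int)) by omega), if_neg (show ¬(perc < (60:Int)) by omega), if_neg (show ¬(perc < (80:Int)) by omega)]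

lemma pv_step_eq (hexes : List String) (perc : Int) :
    (if perc < -40 then hexes ++ ["#118f24"]
    else if perc < -20 then hexes ++ ["#14f514"]
    else if perc < -10 then hexes ++ ["#b9f514"]
    else if perc < 0 then hexes ++ ["#edf514"]
    else if perc < 10 then hexes ++ ["#f5c114"]
    else if perc < 20 then hexes ++ ["#f57914"]
    else if perc < 40 then hexes ++ ["#f53614"]
    else if perc < 60 then hexes ++ ["#a61111"]
    else if perc < 80 then hexes ++ ["#540606"]
    else hexes) =
    (let i : Nat := pvThresholds.foldl (fun s t => if t ≤ perc then s + 1 else s) 0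
     if i < pvColors.length then hexes ++ [pvColors.getD i ""] else hexes) := by
  rw [pv_rank_eq]
  split_ifs <;> simp [pvColors]

-- ===== VERDICT (by name: the statement is the Claim_ definition above) =====
theorem percent_to_hexcol_spec : Claim_equal_percent_to_hexcol := by
  intro xs _
  unfold Spec_percent_to_hexcol percent_to_hexcol percent_to_hexcol_alt
  congr 1
  funext hexes perc
  exact pv_step_eq hexes perc
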